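-- pv_equiv track=rewrite | github.com/Blaxav/Challenges-algo | AOC2020/Antoine/11.py | generateSeatsDict
-- ===== SOURCE A (Python) =====
-- def getAdjacentSeats(scheme:list, x: int, y: int):
--     return [(x+xOffset,y+yOffset) for xOffset in [-1, 0, 1] for yOffset in [-1, 0, 1] if x+xOffset in range(len(scheme[0])) and y+yOffset in range(len(scheme)) and (xOffset or yOffset)]
--
-- def getVisibleSeats(scheme:list, x: int, y: int):
--     visibleSeats = list()
--     for xOffset in [-1, 0, 1]:
--         for yOffset in [-1, 0, 1]:
--             if not xOffset and not yOffset: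
--                 continue
--             xVisibleSeat, yVisibleSeat = x + xOffset, y + yOffset
--             while xVisibleSeat in range(len(scheme[y])) and yVisibleSeat in range(len(scheme)) and scheme[yVisibleSeat][xVisibleSeat] != 'L':
--                 xVisibleSeat += xOffset
--                 yVisibleSeat += yOffset
--             if xVisibleSeat in range(len(scheme[y])) and yVisibleSeat in range(len(scheme)) and scheme[yVisibleSeat][xVisibleSeat] == 'L':
--                 visibleSeats.append((xVisibleSeat, yVisibleSeat))
--
--     return visibleSeats
--
-- def generateSeatsDict(scheme:list, part: int):
--     seatsDict = dict()
--     for y in range(len(scheme)):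
--         for x in range(len(scheme[y])):
--             if scheme[y][x] == 'L':
--                 if part == 1:
--                     seatsDict[(x, y)] = getAdjacentSeats(scheme, x, y)
--                 if part == 2:
--                     seatsDict[(x, y)] = getVisibleSeats(scheme, x, y)
--
--     return seatsDict
-- ===== SOURCE B (Python) =====
-- DIRS = [(-1, -1), (-1, 0), (-1, 1), (0, -1), (0, 1), (1, -1), (1, 0), (1, 1)]
--
-- def generateSeatsDict(scheme: list, part: int):
--     res = {}
--     H = len(scheme)
--     if part == 1:
--         W0 = len(scheme[0]) if scheme else 0
--         for y in range(H):
--             for x in range(len(scheme[y])):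
--                 if scheme[y][x] == 'L':
--                     res[(x, y)] = [(x + dx, y + dy) for dx in (-1, 0, 1) for dy in (-1, 0, 1)
--                                    if (dx or dy) and 0 <= x + dx < W0 and 0 <= y + dy < H]
--     elif part == 2:
--         W = len(scheme[0]) if scheme else 0
--         grid = {(x, y): ch for y, row in enumerate(scheme) for x, ch in enumerate(row)}
--         seats = [(x, y) for y in range(H) for x in range(len(scheme[y])) if scheme[y][x] == 'L']
--
--         def ray(x, y, dx, dy):
--             out = []
--             while 0 <= x < W and 0 <= y < H:
--                 out.append((x, y))
--                 x += dx
--                 y += dy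
--             return out
--
--         def sweep(dx, dy):
--             # one pass along every maximal line of direction (dx, dy):
--             # consecutive seats on a line are mutually visible
--             starts = [(x, y) for y in range(H) for x in range(W)
--                       if not (0 <= x - dx < W and 0 <= y - dy < H)]
--             fwd, bwd = {}, {}
--             for sx, sy in starts:
--                 prev = None
--                 for c in ray(sx, sy, dx, dy):
--                     if grid.get(c) == 'L':
--                         if prev is not None:
--                             bwd[c] = prev
--                             fwd[prev] = c
--                         prev = c
--             return fwd, bwd
--
--         e, w = sweep(1, 0)
--         s_, n = sweep(0, 1)
--         se, nw = sweep(1, 1)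
--         ne, sw = sweep(1, -1)
--         look = [nw, w, sw, n, s_, ne, e, se]  # dicts in DIRS order
--         res = {p: [d[p] for d in look if p in d] for p in seats}
--     return res
-- ===== Notes on version B (the rewrite author's own statement) =====
-- stated objective: faster
-- what changed: Part 2 is rebuilt as one linear sweep per line orientation (rows, columns, both diagonals): each maximal line is walked once linking consecutive seats, so the per-seat per-direction ray walks of A disappear.
-- outside the precondition, e.g. on generateSeatsDict(['L', 'LL'], 2): A raises IndexError, B returns {(0, 0): [(0, 1)], (0, 1): [(0, 0)], (1, 1): []}
import Mathlib
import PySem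

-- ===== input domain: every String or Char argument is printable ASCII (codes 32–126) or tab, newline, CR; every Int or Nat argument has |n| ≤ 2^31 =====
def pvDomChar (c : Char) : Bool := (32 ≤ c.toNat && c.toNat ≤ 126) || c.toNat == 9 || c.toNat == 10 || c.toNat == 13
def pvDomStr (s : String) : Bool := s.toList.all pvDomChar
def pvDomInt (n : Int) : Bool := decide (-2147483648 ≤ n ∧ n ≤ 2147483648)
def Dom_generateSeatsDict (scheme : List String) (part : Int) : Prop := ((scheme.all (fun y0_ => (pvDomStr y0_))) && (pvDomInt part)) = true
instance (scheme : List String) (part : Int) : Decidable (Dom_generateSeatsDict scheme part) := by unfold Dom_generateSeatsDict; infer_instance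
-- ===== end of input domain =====

-- B replaces A's per-seat per-direction ray walks (part 2) by one linear sweep per line
-- orientation linking consecutive seats, an asymptotically faster algorithm (O(W*H) vs O(W*H*(W+H))).


-- ===== PORT A =====
-- char of scheme[y][x]; every use in either port is guarded by a bounds check (Python indexes in range there)
def pvCharAt (scheme : List String) (x y : Int) : Char :=
  ((scheme.getD y.toNat "").toList.getD x.toNat ' ')

def getAdjacentSeats (scheme : List String) (x y : Int) : List (Int × Int) :=
  ([-1, 0, 1] : List Int).flatMap (fun xo =>
    ([-1, 0, 1] : List Int).filterMap (fun yo =>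
      if (0 ≤ x + xo ∧ x + xo < ((scheme.headD "").toList.length : Int)) ∧
         (0 ≤ y + yo ∧ y + yo < (scheme.length : Int)) ∧ (¬ xo = 0 ∨ ¬ yo = 0)
      then some (x + xo, y + yo) else none))

-- the while loop of getVisibleSeats; fuel bounds the loop (one coordinate moves monotonically, so it is never exhausted)
def pvWalk (scheme : List String) (rowLen xo yo : Int) : Nat → Int → Int → Int × Int
  | 0, xv, yv => (xv, yv)
  | n+1, xv, yv =>
    if (0 ≤ xv ∧ xv < rowLen) ∧ (0 ≤ yv ∧ yv < (scheme.length : Int)) ∧ ¬ pvCharAt scheme xv yv = 'L'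
    then pvWalk scheme rowLen xo yo n (xv + xo) (yv + yo)
    else (xv, yv)

def getVisibleSeats (scheme : List String) (x y : Int) : List (Int × Int) :=
  ([-1, 0, 1] : List Int).flatMap (fun xo =>
    ([-1, 0, 1] : List Int).filterMap (fun yo =>
      if xo = 0 ∧ yo = 0 then none
      else
        let p := pvWalk scheme ((scheme.getD y.toNat "").toList.length : Int) xo yo
          (scheme.length + (scheme.getD y.toNat "").toList.length + 2) (x + xo) (y + yo)
        if (0 ≤ p.1 ∧ p.1 < ((scheme.getD y.toNat "").toList.length : Int)) ∧
           (0 ≤ p.2 ∧ p.2 < (scheme.length : Int)) ∧ pvCharAt scheme p.1 p.2 = 'L'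
        then some p else none))

def generateSeatsDict (scheme : List String) (part : Int) : List (Int × Int × List (Int × Int)) :=
  (List.range scheme.length).flatMap (fun (y : Nat) =>
    (List.range (scheme.getD y "").toList.length).filterMap (fun (x : Nat) =>
      if pvCharAt scheme (x : Int) (y : Int) = 'L' then
        if part = 1 then some ((x : Int), (y : Int), getAdjacentSeats scheme (x : Int) (y : Int))
        else if part = 2 then some ((x : Int), (y : Int), getVisibleSeats scheme (x : Int) (y : Int))
        else none
      else none))

-- ===== PORT B =====
def pvInb (W H : Int) (c : Int × Int) : Bool :=
  decide (0 ≤ c.1 ∧ c.1 < W ∧ 0 ≤ c.2 ∧ c.2 < H)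

def pvGridB (scheme : List String) : PySem.Dict (Int × Int) Char :=
  (PySem.List.enumerate scheme 0).foldl (fun d yr =>
    (PySem.List.enumerate yr.2.toList 0).foldl (fun d2 xc => d2.insert (xc.1, yr.1) xc.2) d)
    PySem.Dict.empty

-- the ray(...) while loop of B, as fuel recursion (never exhausted: one coordinate moves monotonically)
def pvRayB (W H dx dy : Int) : Nat → Int → Int → List (Int × Int)
  | 0, _, _ => []
  | n+1, x, y =>
    if pvInb W H (x, y) then (x, y) :: pvRayB W H dx dy n (x + dx) (y + dy)
    else []

def pvStartsB (W H dx dy : Int) : List (Int × Int) :=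
  (List.range H.toNat).flatMap (fun (y : Nat) =>
    (List.range W.toNat).filterMap (fun (x : Nat) =>
      if ¬ pvInb W H ((x : Int) - dx, (y : Int) - dy) then some ((x : Int), (y : Int)) else none))

def pvLinkB (grid : PySem.Dict (Int × Int) Char)
    (st : PySem.Dict (Int × Int) (Int × Int) × PySem.Dict (Int × Int) (Int × Int) × Option (Int × Int))
    (c : Int × Int) :
    PySem.Dict (Int × Int) (Int × Int) × PySem.Dict (Int × Int) (Int × Int) × Option (Int × Int) :=
  if grid.get? c = some 'L' then
    match st with
    | (fwd, bwd, some q) => (fwd.insert q c, bwd.insert c q, some c)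
    | (fwd, bwd, none) => (fwd, bwd, some c)
  else st

def pvSweepB (grid : PySem.Dict (Int × Int) Char) (W H dx dy : Int) :
    PySem.Dict (Int × Int) (Int × Int) × PySem.Dict (Int × Int) (Int × Int) :=
  (pvStartsB W H dx dy).foldl (fun fb s =>
      let t := (pvRayB W H dx dy (W.toNat + H.toNat + 2) s.1 s.2).foldl (pvLinkB grid) (fb.1, fb.2, none)
      (t.1, t.2.1))
    (PySem.Dict.empty, PySem.Dict.empty)

def generateSeatsDict_alt (scheme : List String) (part : Int) : List (Int × Int × List (Int × Int)) :=
  if part = 1 then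
    (List.range scheme.length).flatMap (fun (y : Nat) =>
      (List.range (scheme.getD y "").toList.length).filterMap (fun (x : Nat) =>
        if pvCharAt scheme (x : Int) (y : Int) = 'L' then
          some ((x : Int), (y : Int),
            ([-1, 0, 1] : List Int).flatMap (fun dx =>
              ([-1, 0, 1] : List Int).filterMap (fun dy =>
                if (¬ dx = 0 ∨ ¬ dy = 0) ∧
                   (0 ≤ (x : Int) + dx ∧ (x : Int) + dx < ((scheme.headD "").toList.length : Int)) ∧
                   (0 ≤ (y : Int) + dy ∧ (y : Int) + dy < (scheme.length : Int))
                then some ((x : Int) + dx, (y : Int) + dy) else none)))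
        else none))
  else if part = 2 then
    let W : Int := ((scheme.headD "").toList.length : Int)
    let H : Int := (scheme.length : Int)
    let grid := pvGridB scheme
    let seats : List (Int × Int) :=
      (List.range scheme.length).flatMap (fun (y : Nat) =>
        (List.range (scheme.getD y "").toList.length).filterMap (fun (x : Nat) =>
          if pvCharAt scheme (x : Int) (y : Int) = 'L' then some ((x : Int), (y : Int)) else none))
    let ew := pvSweepB grid W H 1 0
    let sn := pvSweepB grid W H 0 1
    let senw := pvSweepB grid W H 1 1
    let nesw := pvSweepB grid W H 1 (-1)
    let look := [senw.2, ew.2, nesw.2, sn.2, sn.1, nesw.1, ew.1, senw.1]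
    seats.map (fun p => (p.1, p.2, look.filterMap (fun d => d.get? p)))
  else []

-- ===== PRECONDITION & SPEC =====
-- Pre_ restricts part 2 to the function's natural domain: rectangular grids (or grids with no
-- seat at all, where nothing is looked up). On ragged grids A's part-2 visibility walk mixes the
-- origin row's length with other rows' and typically raises IndexError; B assumes a rectangle.
def Pre_generateSeatsDict (scheme : List String) (part : Int) : Prop :=
  part = 2 →
    ((∀ r ∈ scheme, r.toList.length = (scheme.headD "").toList.length) ∨
     (∀ r ∈ scheme, ¬ 'L' ∈ r.toList))

instance (scheme : List String) (part : Int) : Decidable (Pre_generateSeatsDict scheme part) := by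
  unfold Pre_generateSeatsDict; infer_instance

def pvWitness_generateSeatsDict : List String × Int := (["L.", ".L"], 2)

def Spec_generateSeatsDict (scheme : List String) (part : Int) (out : List (Int × Int × List (Int × Int))) : Prop := out = generateSeatsDict_alt scheme part
instance (scheme : List String) (part : Int) (out : List (Int × Int × List (Int × Int))) : Decidable (Spec_generateSeatsDict scheme part out) := by unfold Spec_generateSeatsDict; infer_instance

-- ===== CLAIM (what is proved, stated in full; the proofs are below) =====
def Claim_equal_generateSeatsDict : Prop := ∀ (scheme : List String) (part : Int), Dom_generateSeatsDict scheme part → Pre_generateSeatsDict scheme part → Spec_generateSeatsDict scheme part (generateSeatsDict scheme part)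

-- ===== LEMMAS AND PROOFS =====

-- ---- generic ray machinery ----
def pvDirOK (dx dy : Int) : Prop :=
  (dx = -1 ∨ dx = 0 ∨ dx = 1) ∧ (dy = -1 ∨ dy = 0 ∨ dy = 1) ∧ ¬ (dx = 0 ∧ dy = 0)

def pvMu (W H dx dy x y : Int) : Nat :=
  (if 0 < dy then H - y else if dy < 0 then y + 1 else if 0 < dx then W - x else x + 1).toNat

def pvRay (W H dx dy x y : Int) : List (Int × Int) :=
  pvRayB W H dx dy (W.toNat + H.toNat + 2) x y

theorem pv_ray_succ (W H dx dy : Int) (n : Nat) (x y : Int) :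
    pvRayB W H dx dy (n + 1) x y =
      if pvInb W H (x, y) = true then (x, y) :: pvRayB W H dx dy n (x + dx) (y + dy) else [] := rfl

theorem pv_ray_nil (W H dx dy x y : Int) (h : ¬ pvInb W H (x, y) = true) :
    ∀ n, pvRayB W H dx dy n x y = [] := by
  intro n; cases n <;> simp [pvRayB, h]

theorem pv_mu_pos (W H dx dy x y : Int) (h : pvInb W H (x, y) = true) :
    1 ≤ pvMu W H dx dy x y := by
  simp [pvInb] at h; unfold pvMu; split_ifs <;> omega

theorem pv_mu_step (W H dx dy x y : Int) (hd : pvDirOK dx dy)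
    (h : pvInb W H (x, y) = true) :
    pvMu W H dx dy (x + dx) (y + dy) + 1 = pvMu W H dx dy x y := by
  simp [pvInb] at h
  obtain ⟨hx, hy, hnz⟩ := hd
  unfold pvMu
  rcases hx with h1 | h1 | h1 <;> rcases hy with h2 | h2 | h2 <;> subst h1 <;> subst h2 <;>
    simp_all <;> omega

theorem pv_mu_le (W H dx dy x y : Int) (h : pvInb W H (x, y) = true) :
    pvMu W H dx dy x y ≤ W.toNat + H.toNat + 1 := by
  simp [pvInb] at h; unfold pvMu; split_ifs <;> omega

theorem pv_ray_stable (W H dx dy : Int) (hd : pvDirOK dx dy) :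
    ∀ n m x y, (pvInb W H (x, y) = true → (pvMu W H dx dy x y ≤ n ∧ pvMu W H dx dy x y ≤ m)) →
    pvRayB W H dx dy n x y = pvRayB W H dx dy m x y := by
  intro n
  induction n with
  | zero =>
    intro m x y hmu
    by_cases h : pvInb W H (x, y) = true
    · obtain ⟨h1, h2⟩ := hmu h
      have := pv_mu_pos W H dx dy x y h; omega
    · rw [pv_ray_nil _ _ _ _ _ _ h, pv_ray_nil _ _ _ _ _ _ h]
  | succ n ih =>
    intro m x y hmu
    by_cases h : pvInb W H (x, y) = true
    · obtain ⟨h1, h2⟩ := hmu h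
      cases m with
      | zero => have := pv_mu_pos W H dx dy x y h; omega
      | succ m =>
        simp only [pvRayB, h, if_pos]
        congr 1
        apply ih
        intro hnext
        have := pv_mu_step W H dx dy x y hd h
        omega
    · rw [pv_ray_nil _ _ _ _ _ _ h, pv_ray_nil _ _ _ _ _ _ h]

theorem pv_ray_cons (W H dx dy x y : Int) (hd : pvDirOK dx dy) (h : pvInb W H (x, y) = true) :
    pvRay W H dx dy x y = (x, y) :: pvRay W H dx dy (x + dx) (y + dy) := by
  unfold pvRay
  have hf : W.toNat + H.toNat + 2 = (W.toNat + H.toNat + 1) + 1 := by omega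
  rw [hf, pv_ray_succ, if_pos h]
  congr 1
  apply pv_ray_stable W H dx dy hd
  intro hnext
  have h1 := pv_mu_step W H dx dy x y hd h
  have h2 := pv_mu_le W H dx dy x y h
  omega

theorem pv_ray_mem_inb (W H dx dy : Int) :
    ∀ n x y c, c ∈ pvRayB W H dx dy n x y → pvInb W H c = true := by
  intro n
  induction n with
  | zero => intro x y c hc; simp [pvRayB] at hc
  | succ n ih =>
    intro x y c hc
    by_cases h : pvInb W H (x, y) = true
    · simp [pvRayB, h] at hc
      rcases hc with rfl | hc
      · exact h
      · exact ih _ _ _ hc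
    · simp [pv_ray_nil _ _ _ _ _ _ h] at hc

theorem pv_ray_phi_le (W H dx dy : Int) :
    ∀ n x y c, c ∈ pvRayB W H dx dy n x y → x * dx + y * dy ≤ c.1 * dx + c.2 * dy := by
  intro n
  induction n with
  | zero => intro x y c hc; simp [pvRayB] at hc
  | succ n ih =>
    intro x y c hc
    by_cases h : pvInb W H (x, y) = true
    · simp [pvRayB, h] at hc
      rcases hc with rfl | hc
      · simp
      · have := ih _ _ _ hc; nlinarith [sq_nonneg dx, sq_nonneg dy]
    · simp [pv_ray_nil _ _ _ _ _ _ h] at hc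

theorem pv_ray_pairwise (W H dx dy : Int) (hd : pvDirOK dx dy) :
    ∀ n x y, (pvRayB W H dx dy n x y).Pairwise
      (fun a b => a.1 * dx + a.2 * dy < b.1 * dx + b.2 * dy) := by
  intro n
  induction n with
  | zero => intro x y; simp [pvRayB]
  | succ n ih =>
    intro x y
    by_cases h : pvInb W H (x, y) = true
    · simp only [pvRayB, h, if_pos]
      refine List.Pairwise.cons ?_ (ih _ _)
      intro c hc
      have hle := pv_ray_phi_le W H dx dy n (x + dx) (y + dy) c hc
      have hsq : 1 ≤ dx * dx + dy * dy := by
        obtain ⟨h1, h2, h3⟩ := hd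
        rcases h1 with rfl | rfl | rfl <;> rcases h2 with rfl | rfl | rfl <;> simp_all <;> omega
      simp only []
      nlinarith
    · rw [pv_ray_nil _ _ _ _ _ _ h]; simp

theorem pv_ray_nodup (W H dx dy : Int) (hd : pvDirOK dx dy) (n : Nat) (x y : Int) :
    (pvRayB W H dx dy n x y).Nodup := by
  have := pv_ray_pairwise W H dx dy hd n x y
  exact this.imp (by intro a b h hab; subst hab; omega)

theorem pv_ray_chain (W H dx dy : Int) :
    ∀ (l1 : List (Int × Int)) a b l2 n x y, pvRayB W H dx dy n x y = l1 ++ a :: b :: l2 →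
      b = (a.1 + dx, a.2 + dy) := by
  intro l1
  induction l1 with
  | nil =>
    intro a b l2 n x y heq
    cases n with
    | zero => simp [pvRayB] at heq
    | succ n =>
      by_cases h : pvInb W H (x, y) = true
      · rw [pv_ray_succ, if_pos h] at heq
        simp only [List.nil_append] at heq
        obtain ⟨rfl, htail⟩ := List.cons_eq_cons.mp heq
        cases n with
        | zero => simp [pvRayB] at htail
        | succ n =>
          by_cases h2 : pvInb W H (x + dx, y + dy) = true
          · rw [pv_ray_succ, if_pos h2] at htail
            have hb := (List.cons_eq_cons.mp htail).1
            simp [← hb]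
          · rw [pv_ray_nil _ _ _ _ _ _ h2] at htail; simp at htail
      · rw [pv_ray_nil _ _ _ _ _ _ h] at heq; simp at heq
  | cons hd1 tl ih =>
    intro a b l2 n x y heq
    cases n with
    | zero => simp [pvRayB] at heq
    | succ n =>
      by_cases h : pvInb W H (x, y) = true
      · rw [pv_ray_succ, if_pos h] at heq
        simp only [List.cons_append] at heq
        exact ih a b l2 n (x + dx) (y + dy) (List.cons_eq_cons.mp heq).2
      · rw [pv_ray_nil _ _ _ _ _ _ h] at heq; simp at heq

theorem pv_ray_split (W H dx dy : Int) (hd : pvDirOK dx dy) (x y : Int) (c : Int × Int)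
    (hc : c ∈ pvRay W H dx dy x y) :
    ∃ pre suf, pvRay W H dx dy x y = pre ++ c :: suf ∧
      suf = pvRay W H dx dy (c.1 + dx) (c.2 + dy) := by
  have aux : ∀ n x y, (pvInb W H (x, y) = true → pvMu W H dx dy x y ≤ n) →
      ∀ c, c ∈ pvRayB W H dx dy n x y →
      ∃ pre suf, pvRayB W H dx dy n x y = pre ++ c :: suf ∧
        suf = pvRay W H dx dy (c.1 + dx) (c.2 + dy) := by
    intro n
    induction n with
    | zero => intro x y _ c hc; simp [pvRayB] at hc
    | succ n ih =>
      intro x y hmu c hc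
      by_cases h : pvInb W H (x, y) = true
      · rw [pv_ray_succ, if_pos h] at hc ⊢
        rcases List.mem_cons.mp hc with rfl | hc
        · refine ⟨[], pvRayB W H dx dy n (x + dx) (y + dy), by simp, ?_⟩
          apply pv_ray_stable W H dx dy hd
          intro hnext
          have h1 := pv_mu_step W H dx dy x y hd h
          have h2 := pv_mu_le W H dx dy (x + dx) (y + dy) hnext
          have h3 := hmu h
          omega
        · obtain ⟨pre, suf, heq, hsuf⟩ := ih (x + dx) (y + dy)
            (fun hnext => by have h1 := pv_mu_step W H dx dy x y hd h; have h3 := hmu h; omega) c hc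
          exact ⟨(x, y) :: pre, suf, by rw [heq]; simp, hsuf⟩
      · rw [pv_ray_nil _ _ _ _ _ _ h] at hc; simp at hc
  exact aux _ x y (fun hin => by have := pv_mu_le W H dx dy x y hin; omega) c hc

theorem pv_dirOK_neg (dx dy : Int) (hd : pvDirOK dx dy) : pvDirOK (-dx) (-dy) := by
  obtain ⟨hx, hy, hnz⟩ := hd
  refine ⟨?_, ?_, ?_⟩ <;> omega

theorem pv_ray_back (W H dx dy : Int) (hd : pvDirOK dx dy) (x y : Int)
    (hstart : ¬ pvInb W H (x - dx, y - dy) = true) :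
    ∀ (pre : List (Int × Int)) c suf, pvRay W H dx dy x y = pre ++ c :: suf →
      pre.reverse = pvRay W H (-dx) (-dy) (c.1 - dx) (c.2 - dy) := by
  intro pre
  induction pre using List.reverseRecOn with
  | nil =>
    intro c suf heq
    have hne : pvRay W H dx dy x y ≠ [] := by rw [heq]; simp
    have hin : pvInb W H (x, y) = true := by
      by_contra hco
      exact hne (pv_ray_nil W H dx dy x y hco _)
    rw [pv_ray_cons W H dx dy x y hd hin] at heq
    have hc : c = (x, y) := ((List.cons_eq_cons.mp heq).1).symm
    subst hc
    simp only [List.reverse_nil]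
    exact (pv_ray_nil W H (-dx) (-dy) _ _ (by simpa using hstart) _).symm
  | append_singleton pre' b ih =>
    intro c suf heq
    rw [List.append_assoc] at heq
    simp only [List.cons_append, List.nil_append] at heq
    have hb : c = (b.1 + dx, b.2 + dy) :=
      pv_ray_chain W H dx dy pre' b c suf _ x y heq
    have hbmem : b ∈ pvRay W H dx dy x y := by rw [heq]; simp
    have hbin : pvInb W H b = true := pv_ray_mem_inb W H dx dy _ x y b hbmem
    have ihr := ih b (c :: suf) heq
    rw [List.reverse_append, List.reverse_singleton]
    simp only [List.singleton_append]
    rw [ihr]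
    have hcb1 : c.1 - dx = b.1 := by rw [hb]; ring
    have hcb2 : c.2 - dy = b.2 := by rw [hb]; ring
    rw [hcb1, hcb2]
    have := pv_ray_cons W H (-dx) (-dy) b.1 b.2 (pv_dirOK_neg dx dy hd) (by simpa using hbin)
    rw [this]
    congr 2 <;> ring

theorem pv_ray_mem_idx (W H dx dy : Int) :
    ∀ n x y c, c ∈ pvRayB W H dx dy n x y →
      ∃ j : Nat, c = (x + j * dx, y + j * dy) ∧
        ∀ k : Nat, k ≤ j → pvInb W H (x + k * dx, y + k * dy) = true := by
  intro n
  induction n with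
  | zero => intro x y c hc; simp [pvRayB] at hc
  | succ n ih =>
    intro x y c hc
    by_cases h : pvInb W H (x, y) = true
    · rw [pv_ray_succ, if_pos h] at hc
      rcases List.mem_cons.mp hc with rfl | hc
      · exact ⟨0, by simp, fun k hk => by interval_cases k; simpa using h⟩
      · obtain ⟨j, hj, hchain⟩ := ih _ _ _ hc
        refine ⟨j + 1, ?_, ?_⟩
        · rw [hj, Prod.mk.injEq]; push_cast; constructor <;> ring
        · intro k hk
          cases k with
          | zero => simpa using h
          | succ k =>
            have := hchain k (by omega)
            have e1 : x + (↑(k + 1) : Int) * dx = x + dx + (k : Int) * dx := by push_cast; ring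
            have e2 : y + (↑(k + 1) : Int) * dy = y + dy + (k : Int) * dy := by push_cast; ring
            rw [e1, e2]; exact this
    · rw [pv_ray_nil _ _ _ _ _ _ h] at hc; simp at hc

theorem pv_ray_cover (W H dx dy : Int) (hd : pvDirOK dx dy) (p : Int × Int)
    (hp : pvInb W H p = true) :
    ∃ s : Int × Int, pvInb W H s = true ∧ ¬ pvInb W H (s.1 - dx, s.2 - dy) = true ∧
      p ∈ pvRay W H dx dy s.1 s.2 := by
  have aux : ∀ n (p : Int × Int), pvMu W H (-dx) (-dy) p.1 p.2 ≤ n → pvInb W H p = true →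
      ∃ s : Int × Int, pvInb W H s = true ∧ ¬ pvInb W H (s.1 - dx, s.2 - dy) = true ∧
        p ∈ pvRay W H dx dy s.1 s.2 := by
    intro n
    induction n with
    | zero =>
      intro p hle hin
      have := pv_mu_pos W H (-dx) (-dy) p.1 p.2 (by simpa using hin)
      omega
    | succ n ih =>
      intro p hle hin
      by_cases hb : pvInb W H (p.1 - dx, p.2 - dy) = true
      · have hstep := pv_mu_step W H (-dx) (-dy) p.1 p.2 (pv_dirOK_neg dx dy hd) (by simpa using hin)
        have hmu2 : pvMu W H (-dx) (-dy) (p.1 - dx) (p.2 - dy) ≤ n := by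
          have e1 : p.1 + -dx = p.1 - dx := by ring
          have e2 : p.2 + -dy = p.2 - dy := by ring
          rw [e1, e2] at hstep; omega
        obtain ⟨s, hs1, hs2, hmem⟩ := ih (p.1 - dx, p.2 - dy) hmu2 hb
        obtain ⟨pre, suf, heq, hsuf⟩ := pv_ray_split W H dx dy hd s.1 s.2 _ hmem
        refine ⟨s, hs1, hs2, ?_⟩
        rw [heq]
        have e3 : (p.1 - dx, p.2 - dy).1 + dx = p.1 := by simp
        have e4 : (p.1 - dx, p.2 - dy).2 + dy = p.2 := by simp
        rw [e3, e4] at hsuf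
        have : p ∈ suf := by
          rw [hsuf, pv_ray_cons W H dx dy p.1 p.2 hd hin]; simp
        simp [this]
      · exact ⟨p, hin, hb, by rw [pv_ray_cons W H dx dy p.1 p.2 hd hin]; simp⟩
  exact aux (pvMu W H (-dx) (-dy) p.1 p.2) p le_rfl hp

theorem pv_ray_uniq (W H dx dy : Int) (hd : pvDirOK dx dy) (s s' p : Int × Int)
    (hs : ¬ pvInb W H (s.1 - dx, s.2 - dy) = true)
    (hs' : ¬ pvInb W H (s'.1 - dx, s'.2 - dy) = true)
    (h1 : p ∈ pvRay W H dx dy s.1 s.2) (h2 : p ∈ pvRay W H dx dy s'.1 s'.2) : s = s' := by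
  obtain ⟨j, hpj, hch⟩ := pv_ray_mem_idx W H dx dy _ s.1 s.2 p h1
  obtain ⟨j', hpj', hch'⟩ := pv_ray_mem_idx W H dx dy _ s'.1 s'.2 p h2
  have e1 : p.1 = s.1 + (j : Int) * dx := by rw [hpj]
  have e2 : p.2 = s.2 + (j : Int) * dy := by rw [hpj]
  have e1' : p.1 = s'.1 + (j' : Int) * dx := by rw [hpj']
  have e2' : p.2 = s'.2 + (j' : Int) * dy := by rw [hpj']
  have hk1 := hch' (j' - j - 1) (by omega)
  have hk2 := hch (j - j' - 1) (by omega)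
  obtain ⟨hx, hy, hnz⟩ := hd
  simp only [pvInb, decide_eq_true_eq] at hk1 hk2 hs hs'
  have goal1 : s.1 = s'.1 ∧ s.2 = s'.2 := by
    rcases hx with rfl | rfl | rfl <;> rcases hy with rfl | rfl | rfl <;>
      [skip; skip; skip; skip; (exact absurd ⟨rfl, rfl⟩ hnz); skip; skip; skip; skip] <;>
      (simp only [] at e1 e2 e1' e2' hk1 hk2 hs hs' ⊢; omega)
  exact Prod.ext goal1.1 goal1.2

theorem pv_mem_starts (W H dx dy : Int) (s : Int × Int) :
    s ∈ pvStartsB W H dx dy ↔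
      (pvInb W H s = true ∧ ¬ pvInb W H (s.1 - dx, s.2 - dy) = true) := by
  unfold pvStartsB
  constructor
  · intro h
    obtain ⟨y, hy, h2⟩ := List.mem_flatMap.mp h
    obtain ⟨x, hx, hsome⟩ := List.mem_filterMap.mp h2
    rw [List.mem_range] at hy hx
    split_ifs at hsome with hcond
    all_goals simp only [Option.some.injEq, reduceCtorEq] at hsome
    subst hsome
    exact ⟨by simp only [pvInb, decide_eq_true_eq]; omega, hcond⟩
  · rintro ⟨hin, hnin⟩
    simp only [pvInb, decide_eq_true_eq] at hin
    obtain ⟨hx0, hxW, hy0, hyH⟩ := hin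
    apply List.mem_flatMap.mpr
    refine ⟨s.2.toNat, List.mem_range.mpr (by omega), ?_⟩
    apply List.mem_filterMap.mpr
    refine ⟨s.1.toNat, List.mem_range.mpr (by omega), ?_⟩
    have ex1 : (s.1.toNat : Int) = s.1 := by omega
    have ex2 : (s.2.toNat : Int) = s.2 := by omega
    rw [ex1, ex2]
    simp [hnin]

theorem pv_nodup_flatMap {α β : Type} (l : List α) (f : α → List β) (hl : l.Nodup)
    (hf : ∀ a ∈ l, (f a).Nodup)
    (hdisj : ∀ a ∈ l, ∀ b ∈ l, a ≠ b → ∀ x ∈ f a, ¬ x ∈ f b) : (l.flatMap f).Nodup := by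
  induction l with
  | nil => simp
  | cons a t ih =>
    rw [List.flatMap_cons, List.nodup_append]
    refine ⟨hf a (by simp), ?_, ?_⟩
    · exact ih (List.nodup_cons.mp hl).2 (fun b hb => hf b (by simp [hb]))
        (fun b hb c hc hbc => hdisj b (by simp [hb]) c (by simp [hc]) hbc)
    · intro x hx z hz hxz
      subst hxz
      obtain ⟨b, hb, hxb⟩ := List.mem_flatMap.mp hz
      have hab : a ≠ b := fun h => (List.nodup_cons.mp hl).1 (h ▸ hb)
      exact hdisj a (by simp) b (by simp [hb]) hab x hx hxb

theorem pv_starts_nodup (W H dx dy : Int) : (pvStartsB W H dx dy).Nodup := by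
  unfold pvStartsB
  apply pv_nodup_flatMap _ _ (List.nodup_range)
  · intro y _
    apply List.Nodup.filterMap _ List.nodup_range
    intro a b c hca hcb
    split_ifs at hca hcb <;>
      simp only [Option.mem_def, Option.some.injEq, reduceCtorEq] at hca hcb
    subst hca
    simp only [Prod.mk.injEq] at hcb
    omega
  · intro a _ b _ hab c hca hcb
    obtain ⟨x1, _, h1⟩ := List.mem_filterMap.mp hca
    obtain ⟨x2, _, h2⟩ := List.mem_filterMap.mp hcb
    split_ifs at h1 h2 <;> simp only [Option.some.injEq, reduceCtorEq] at h1 h2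
    rw [← h2] at h1
    simp only [Prod.mk.injEq] at h1
    exact hab (by exact_mod_cast h1.2)

-- ---- the sweep as association lists ----
def pvPB (grid : PySem.Dict (Int × Int) Char) (c : Int × Int) : Bool :=
  decide (grid.get? c = some 'L')

def pvConsec (l : List (Int × Int)) : List ((Int × Int) × (Int × Int)) := l.zip l.tail

def pvLinkAcc (grid : PySem.Dict (Int × Int) Char) :
    List (Int × Int) → Option (Int × Int) →
    List ((Int × Int) × (Int × Int)) × List ((Int × Int) × (Int × Int)) × Option (Int × Int)
  | [], prev => ([], [], prev)
  | c :: t, prev =>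
    if pvPB grid c then
      match prev with
      | some q =>
        let r := pvLinkAcc grid t (some c)
        ((q, c) :: r.1, (c, q) :: r.2.1, r.2.2)
      | none => pvLinkAcc grid t (some c)
    else pvLinkAcc grid t prev

def pvIns (d : PySem.Dict (Int × Int) (Int × Int)) (l : List ((Int × Int) × (Int × Int))) :
    PySem.Dict (Int × Int) (Int × Int) :=
  l.foldl (fun d e => d.insert e.1 e.2) d

def pvLine (grid : PySem.Dict (Int × Int) Char) (W H dx dy : Int) (s : Int × Int) :
    List (Int × Int) :=
  (pvRay W H dx dy s.1 s.2).filter (pvPB grid)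

def pvLF (grid : PySem.Dict (Int × Int) Char) (W H dx dy : Int) :
    List ((Int × Int) × (Int × Int)) :=
  (pvStartsB W H dx dy).flatMap (fun s => pvConsec (pvLine grid W H dx dy s))

def pvLB (grid : PySem.Dict (Int × Int) Char) (W H dx dy : Int) :
    List ((Int × Int) × (Int × Int)) :=
  (pvStartsB W H dx dy).flatMap (fun s =>
    (pvConsec (pvLine grid W H dx dy s)).map (fun e => (e.2, e.1)))

theorem pv_fold_link (grid : PySem.Dict (Int × Int) Char) :
    ∀ cs fwd bwd prev, cs.foldl (pvLinkB grid) (fwd, bwd, prev) =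
      (pvIns fwd (pvLinkAcc grid cs prev).1, pvIns bwd (pvLinkAcc grid cs prev).2.1,
        (pvLinkAcc grid cs prev).2.2) := by
  intro cs
  induction cs with
  | nil => intro fwd bwd prev; simp [pvLinkAcc, pvIns]
  | cons c t ih =>
    intro fwd bwd prev
    rw [List.foldl_cons]
    by_cases hP : grid.get? c = some 'L'
    · cases prev with
      | some q =>
        simp only [pvLinkB, if_pos hP]
        rw [ih]
        simp [pvLinkAcc, pvPB, hP, pvIns]
      | none =>
        simp only [pvLinkB, if_pos hP]
        rw [ih]
        simp [pvLinkAcc, pvPB, hP]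
    · simp only [pvLinkB, if_neg hP]
      rw [ih]
      simp [pvLinkAcc, pvPB, hP]

theorem pv_linkAcc_eq (grid : PySem.Dict (Int × Int) Char) :
    ∀ cs prev, (pvLinkAcc grid cs prev).1 = pvConsec (prev.toList ++ cs.filter (pvPB grid)) ∧
      (pvLinkAcc grid cs prev).2.1 =
        (pvConsec (prev.toList ++ cs.filter (pvPB grid))).map (fun e => (e.2, e.1)) := by
  intro cs
  induction cs with
  | nil => intro prev; cases prev <;> simp [pvLinkAcc, pvConsec]
  | cons c t ih =>
    intro prev
    by_cases hP : pvPB grid c = true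
    · cases prev with
      | some q =>
        simp only [pvLinkAcc, hP, if_pos]
        obtain ⟨ih1, ih2⟩ := ih (some c)
        simp only [Option.toList_some, List.singleton_append] at ih1 ih2
        constructor
        · rw [ih1]
          simp [List.filter_cons, hP, pvConsec]
        · rw [ih2]
          simp [List.filter_cons, hP, pvConsec]
      | none =>
        simp only [pvLinkAcc, hP, if_pos]
        obtain ⟨ih1, ih2⟩ := ih (some c)
        simp only [Option.toList_some, List.singleton_append] at ih1 ih2
        simp [ih1, ih2, List.filter_cons, hP]
    · have hP' : pvPB grid c = false := by simpa using hP
      simp only [pvLinkAcc, hP', Bool.false_eq_true, if_neg, not_false_iff]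
      obtain ⟨ih1, ih2⟩ := ih prev
      simp [ih1, ih2, List.filter_cons, hP']

theorem pv_sweep_eq (grid : PySem.Dict (Int × Int) Char) (W H dx dy : Int) :
    pvSweepB grid W H dx dy =
      (pvIns PySem.Dict.empty (pvLF grid W H dx dy), pvIns PySem.Dict.empty (pvLB grid W H dx dy)) := by
  have aux : ∀ (ss : List (Int × Int)) f0 b0,
      ss.foldl (fun fb s =>
        let t := (pvRayB W H dx dy (W.toNat + H.toNat + 2) s.1 s.2).foldl (pvLinkB grid) (fb.1, fb.2, none)
        (t.1, t.2.1)) (f0, b0) =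
      (pvIns f0 (ss.flatMap (fun s => pvConsec (pvLine grid W H dx dy s))),
       pvIns b0 (ss.flatMap (fun s => (pvConsec (pvLine grid W H dx dy s)).map (fun e => (e.2, e.1))))) := by
    intro ss
    induction ss with
    | nil => intro f0 b0; simp [pvIns]
    | cons s t ih =>
      intro f0 b0
      rw [List.foldl_cons]
      have hfl := pv_fold_link grid (pvRayB W H dx dy (W.toNat + H.toNat + 2) s.1 s.2) f0 b0 none
      obtain ⟨hl1, hl2⟩ := pv_linkAcc_eq grid (pvRayB W H dx dy (W.toNat + H.toNat + 2) s.1 s.2) none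
      simp only [Option.toList_none, List.nil_append] at hl1 hl2
      simp only [hfl, hl1, hl2]
      rw [ih]
      have hline : (pvRayB W H dx dy (W.toNat + H.toNat + 2) s.1 s.2).filter (pvPB grid) =
          pvLine grid W H dx dy s := rfl
      rw [hline]
      simp [pvIns, List.flatMap_cons, List.foldl_append]
  unfold pvSweepB pvLF pvLB
  exact aux _ _ _

theorem pv_consec_map_fst (l : List (Int × Int)) : (pvConsec l).map (·.1) = l.dropLast := by
  induction l with
  | nil => rfl
  | cons a t ih =>
    cases t with
    | nil => rfl
    | cons b t' =>
      simp only [pvConsec, List.tail_cons, List.zip_cons_cons, List.map_cons] at ih ⊢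
      rw [ih]
      rfl

theorem pv_consec_map_snd (l : List (Int × Int)) : (pvConsec l).map (·.2) = l.tail := by
  induction l with
  | nil => rfl
  | cons a t ih =>
    cases t with
    | nil => rfl
    | cons b t' =>
      simp only [pvConsec, List.tail_cons, List.zip_cons_cons, List.map_cons] at ih ⊢
      rw [ih]

theorem pv_consec_mem_append (a b : Int × Int) (B : List (Int × Int)) :
    ∀ A, (a, b) ∈ pvConsec (A ++ a :: b :: B) := by
  intro A
  induction A with
  | nil => simp [pvConsec]
  | cons x A ih =>
    have hne : A ++ a :: b :: B ≠ [] := by simp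
    obtain ⟨h, t, hht⟩ := List.exists_cons_of_ne_nil hne
    simp only [List.cons_append, hht, pvConsec, List.tail_cons, List.zip_cons_cons] at ih ⊢
    exact List.mem_cons_of_mem _ ih

theorem pv_ins_get_mem (l : List ((Int × Int) × (Int × Int))) (k v : Int × Int)
    (hn : (l.map (·.1)).Nodup) (hm : (k, v) ∈ l) :
    (pvIns PySem.Dict.empty l).get? k = some v := by
  have hitems : (pvIns PySem.Dict.empty l).items = l := by
    unfold pvIns
    have h1 : ∀ a ∈ l, (PySem.Dict.empty : PySem.Dict (Int × Int) (Int × Int)).contains a.1 = false :=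
      fun a _ => PySem.Dict.contains_empty _
    have hit := PySem.Dict.items_foldl_insert_fresh l (fun e => e.1) (fun e => e.2)
      PySem.Dict.empty h1 (by simpa using hn)
    simpa using hit
  apply PySem.Dict.get?_of_mem_items
  · rw [hitems]; exact hm
  · have hk : (pvIns PySem.Dict.empty l).keys = (pvIns PySem.Dict.empty l).items.map (·.1) := by
      simp [PySem.Dict.keys]
    rw [hk, hitems]; exact hn

theorem pv_ins_get_none (l : List ((Int × Int) × (Int × Int))) (k : Int × Int)
    (hn : (l.map (·.1)).Nodup) (hm : ¬ k ∈ l.map (·.1)) :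
    (pvIns PySem.Dict.empty l).get? k = none := by
  have hitems : (pvIns PySem.Dict.empty l).items = l := by
    unfold pvIns
    have h1 : ∀ a ∈ l, (PySem.Dict.empty : PySem.Dict (Int × Int) (Int × Int)).contains a.1 = false :=
      fun a _ => PySem.Dict.contains_empty _
    have hit := PySem.Dict.items_foldl_insert_fresh l (fun e => e.1) (fun e => e.2)
      PySem.Dict.empty h1 (by simpa using hn)
    simpa using hit
  rw [PySem.Dict.get?_eq_none_iff_not_mem_keys]
  have hk : (pvIns PySem.Dict.empty l).keys = (pvIns PySem.Dict.empty l).items.map (·.1) := by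
    simp [PySem.Dict.keys]
  rw [hk, hitems]; exact hm


-- ---- the grid dict ----
theorem pv_grid_row_get :
    ∀ (cs : List Char) (t : Int) (d : PySem.Dict (Int × Int) Char) (y0 x y : Int),
    ((PySem.List.enumerate cs t).foldl (fun d2 xc => d2.insert (xc.1, y0) xc.2) d).get? (x, y) =
      if y = y0 ∧ t ≤ x ∧ x < t + cs.length then some (cs.getD (x - t).toNat ' ')
      else d.get? (x, y) := by
  intro cs
  induction cs with
  | nil =>
    intro t d y0 x y
    rw [PySem.List.enumerate_nil]
    simp only [List.foldl_nil, List.length_nil]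
    rw [if_neg (by omega)]
  | cons c cs ih =>
    intro t d y0 x y
    rw [PySem.List.enumerate_cons, List.foldl_cons, ih]
    rw [PySem.Dict.get?_insert]
    simp only [Prod.mk.injEq, List.length_cons]
    by_cases hA : y = y0 ∧ t + 1 ≤ x ∧ x < t + 1 + (cs.length : Int)
    · rw [if_pos hA, if_pos (by push_cast; omega)]
      have hx : (x - t).toNat = (x - (t + 1)).toNat + 1 := by omega
      rw [hx, List.getD_cons_succ]
    · rw [if_neg hA]
      by_cases hB : x = t ∧ y = y0
      · rw [if_pos hB, if_pos (by push_cast; omega)]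
        obtain ⟨rfl, rfl⟩ := hB
        have hx : (x - x).toNat = 0 := by omega
        rw [hx, List.getD_cons_zero]
      · rw [if_neg hB, if_neg (by push_cast at hA ⊢; omega)]

theorem pv_grid_fold_get :
    ∀ (rows : List String) (s : Int) (d : PySem.Dict (Int × Int) Char),
    (∀ x' y' : Int, s ≤ y' → d.get? (x', y') = none) → ∀ x y : Int,
    ((PySem.List.enumerate rows s).foldl
        (fun d yr => (PySem.List.enumerate yr.2.toList 0).foldl
          (fun d2 xc => d2.insert (xc.1, yr.1) xc.2) d) d).get? (x, y) =
      if s ≤ y ∧ y < s + rows.length ∧ 0 ≤ x ∧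
          x < (((rows.getD (y - s).toNat "").toList.length : Nat) : Int)
      then some ((rows.getD (y - s).toNat "").toList.getD x.toNat ' ')
      else if y < s then d.get? (x, y) else none := by
  intro rows
  induction rows with
  | nil =>
    intro s d hd x y
    rw [PySem.List.enumerate_nil]
    simp only [List.foldl_nil, List.length_nil]
    rw [if_neg (by omega)]
    split_ifs with h
    · rfl
    · exact hd x y (by omega)
  | cons r rows ih =>
    intro s d hd x y
    rw [PySem.List.enumerate_cons, List.foldl_cons]
    have hd1 : ∀ x' y' : Int, s + 1 ≤ y' →
        ((PySem.List.enumerate r.toList 0).foldl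
          (fun d2 xc => d2.insert (xc.1, s) xc.2) d).get? (x', y') = none := by
      intro x' y' hy'
      rw [pv_grid_row_get, if_neg (by omega)]
      exact hd x' y' (by omega)
    rw [ih (s + 1) _ hd1 x y, pv_grid_row_get]
    simp only [List.length_cons]
    by_cases hys : y = s
    · subst hys
      rw [if_neg (by push_cast; omega), if_pos (by omega)]
      have h0 : (y - y).toNat = 0 := by omega
      rw [h0]
      simp only [List.getD_cons_zero, sub_zero, zero_add]
      by_cases hx2 : 0 ≤ x ∧ x < ((r.toList.length : Nat) : Int)
      · rw [if_pos ⟨trivial, hx2⟩, if_pos ⟨le_refl y, by push_cast; omega, hx2⟩]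
      · rw [if_neg (fun h => hx2 ⟨h.2.1, h.2.2⟩), if_neg (fun h => hx2 ⟨h.2.2.1, h.2.2.2⟩),
          if_neg (by omega)]
        exact hd x y (by omega)
    · by_cases hlt : y < s
      · rw [if_neg (by omega), if_pos (by omega), if_neg (by omega), if_pos hlt,
          if_neg (by omega)]
      · have hx : (y - s).toNat = (y - (s + 1)).toNat + 1 := by omega
        rw [hx]
        simp only [List.getD_cons_succ]
        by_cases hA : s + 1 ≤ y ∧ y < s + 1 + (rows.length : Int) ∧ 0 ≤ x ∧
            x < (((rows.getD (y - (s + 1)).toNat "").toList.length : Nat) : Int)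
        · rw [if_pos hA, if_pos (by push_cast at hA ⊢; omega)]
        · rw [if_neg hA, if_neg (show ¬ y < s + 1 by omega),
            if_neg (by push_cast at hA ⊢; omega), if_neg (show ¬ y < s by omega)]

theorem pv_grid_get (scheme : List String)
    (hrect : ∀ r ∈ scheme, r.toList.length = (scheme.headD "").toList.length) (x y : Int) :
    (pvGridB scheme).get? (x, y) =
      if pvInb ((scheme.headD "").toList.length : Int) (scheme.length : Int) (x, y) = true
      then some (pvCharAt scheme x y) else none := by
  unfold pvGridB
  rw [pv_grid_fold_get scheme 0 _ (fun x' y' _ => PySem.Dict.get?_empty _) x y]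
  by_cases hy : 0 ≤ y ∧ y < (scheme.length : Int)
  · have hidx : y.toNat < scheme.length := by omega
    have hmem : scheme.getD y.toNat "" ∈ scheme := by
      rw [List.getD_eq_getElem scheme "" hidx]
      exact List.getElem_mem hidx
    have hlen : (scheme.getD y.toNat "").toList.length = (scheme.headD "").toList.length :=
      hrect _ hmem
    have hy0 : (y - 0).toNat = y.toNat := by omega
    rw [hy0, hlen]
    unfold pvCharAt
    simp only [pvInb, decide_eq_true_eq]
    split_ifs with h1 h2 h3 <;> first | rfl | omega
  · have hy0 : (y - 0).toNat = y.toNat := by omega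
    rw [hy0]
    simp only [pvInb, decide_eq_true_eq]
    split_ifs with h1 h2 h3 h4 <;>
      first
        | omega
        | rfl
        | (exact PySem.Dict.get?_empty _)

theorem pv_pb_iff (scheme : List String)
    (hrect : ∀ r ∈ scheme, r.toList.length = (scheme.headD "").toList.length) (c : Int × Int) :
    pvPB (pvGridB scheme) c = true ↔
      (pvInb ((scheme.headD "").toList.length : Int) (scheme.length : Int) c = true ∧
        pvCharAt scheme c.1 c.2 = 'L') := by
  obtain ⟨c1, c2⟩ := c
  unfold pvPB
  rw [decide_eq_true_eq, pv_grid_get scheme hrect c1 c2]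
  split_ifs with h
  · simp only [Option.some.injEq, h, true_and]
  · simp only [reduceCtorEq, false_iff, not_and]
    intro hin
    exact absurd hin h


-- ---- A's walk vs rays ----
def pvW (scheme : List String) : Int := ((scheme.headD "").toList.length : Int)
def pvH (scheme : List String) : Int := (scheme.length : Int)

def pvWrap (scheme : List String) (r : Int × Int) : Option (Int × Int) :=
  if (0 ≤ r.1 ∧ r.1 < pvW scheme) ∧ (0 ≤ r.2 ∧ r.2 < pvH scheme) ∧
      pvCharAt scheme r.1 r.2 = 'L'
  then some r else none

theorem pv_walk_succ (scheme : List String) (rowLen xo yo : Int) (n : Nat) (x y : Int) :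
    pvWalk scheme rowLen xo yo (n + 1) x y =
      if (0 ≤ x ∧ x < rowLen) ∧ (0 ≤ y ∧ y < (scheme.length : Int)) ∧
          ¬ pvCharAt scheme x y = 'L'
      then pvWalk scheme rowLen xo yo n (x + xo) (y + yo) else (x, y) := rfl

theorem pv_walk_find (scheme : List String)
    (hrect : ∀ r ∈ scheme, r.toList.length = (scheme.headD "").toList.length)
    (dx dy : Int) (hd : pvDirOK dx dy) :
    ∀ (n : Nat) (x y : Int),
    (pvInb (pvW scheme) (pvH scheme) (x, y) = true →
      pvMu (pvW scheme) (pvH scheme) dx dy x y ≤ n) →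
    pvWrap scheme (pvWalk scheme (pvW scheme) dx dy n x y) =
      (pvRayB (pvW scheme) (pvH scheme) dx dy n x y).find? (pvPB (pvGridB scheme)) := by
  intro n
  induction n with
  | zero =>
    intro x y hmu
    by_cases hin : pvInb (pvW scheme) (pvH scheme) (x, y) = true
    · have h1 := pv_mu_pos (pvW scheme) (pvH scheme) dx dy x y hin
      have h2 := hmu hin
      omega
    · rw [pv_ray_nil _ _ _ _ _ _ hin]
      simp only [List.find?_nil]
      show pvWrap scheme (x, y) = none
      unfold pvWrap
      rw [if_neg (fun hcon => hin (by
        simp only [pvInb, decide_eq_true_eq]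
        exact ⟨hcon.1.1, hcon.1.2, hcon.2.1.1, hcon.2.1.2⟩))]
  | succ n ih =>
    intro x y hmu
    by_cases hin : pvInb (pvW scheme) (pvH scheme) (x, y) = true
    · have hb := hin
      simp only [pvInb, decide_eq_true_eq] at hb
      rw [pv_ray_succ, if_pos hin]
      by_cases hch : pvCharAt scheme x y = 'L'
      · have hwalk : pvWalk scheme (pvW scheme) dx dy (n + 1) x y = (x, y) := by
          rw [pv_walk_succ, if_neg (fun hcon => hcon.2.2 hch)]
        rw [hwalk]
        have hPB : pvPB (pvGridB scheme) (x, y) = true :=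
          (pv_pb_iff scheme hrect (x, y)).mpr ⟨hin, hch⟩
        rw [List.find?_cons_of_pos (h := hPB)]
        unfold pvWrap
        rw [if_pos ⟨⟨hb.1, hb.2.1⟩, ⟨hb.2.2.1, hb.2.2.2⟩, hch⟩]
      · have hwalk : pvWalk scheme (pvW scheme) dx dy (n + 1) x y =
            pvWalk scheme (pvW scheme) dx dy n (x + dx) (y + dy) := by
          rw [pv_walk_succ, if_pos ⟨⟨hb.1, hb.2.1⟩, ⟨hb.2.2.1, hb.2.2.2⟩, hch⟩]
        rw [hwalk]
        have hPB : ¬ pvPB (pvGridB scheme) (x, y) = true :=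
          fun hcon => hch ((pv_pb_iff scheme hrect (x, y)).mp hcon).2
        rw [List.find?_cons_of_neg (h := by simpa using hPB)]
        apply ih
        intro hnext
        have h1 := pv_mu_step (pvW scheme) (pvH scheme) dx dy x y hd hin
        have h2 := hmu hin
        omega
    · rw [pv_ray_nil _ _ _ _ _ _ hin]
      simp only [List.find?_nil]
      have hwalk : pvWalk scheme (pvW scheme) dx dy (n + 1) x y = (x, y) := by
        rw [pv_walk_succ, if_neg (fun hcon => hin (by
          simp only [pvInb, decide_eq_true_eq]
          exact ⟨hcon.1.1, hcon.1.2, hcon.2.1.1, hcon.2.1.2⟩))]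
      rw [hwalk]
      unfold pvWrap
      rw [if_neg (fun hcon => hin (by
        simp only [pvInb, decide_eq_true_eq]
        exact ⟨hcon.1.1, hcon.1.2, hcon.2.1.1, hcon.2.1.2⟩))]

theorem pv_wrap_dir (scheme : List String)
    (hrect : ∀ r ∈ scheme, r.toList.length = (scheme.headD "").toList.length)
    (x y : Int) (hy : 0 ≤ y ∧ y < pvH scheme) (xo yo : Int) (hd : pvDirOK xo yo) :
    (let p := pvWalk scheme ((scheme.getD y.toNat "").toList.length : Int) xo yo
        (scheme.length + (scheme.getD y.toNat "").toList.length + 2) (x + xo) (y + yo)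
     if (0 ≤ p.1 ∧ p.1 < ((scheme.getD y.toNat "").toList.length : Int)) ∧
        (0 ≤ p.2 ∧ p.2 < (scheme.length : Int)) ∧ pvCharAt scheme p.1 p.2 = 'L'
     then some p else none) =
    (pvRay (pvW scheme) (pvH scheme) xo yo (x + xo) (y + yo)).find?
      (pvPB (pvGridB scheme)) := by
  have hidx : y.toNat < scheme.length := by
    simp only [pvH] at hy; omega
  have hlen : (scheme.getD y.toNat "").toList.length = (scheme.headD "").toList.length :=
    hrect _ (by rw [List.getD_eq_getElem scheme "" hidx]; exact List.getElem_mem hidx)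
  rw [hlen]
  show pvWrap scheme (pvWalk scheme (pvW scheme) xo yo
      (scheme.length + (scheme.headD "").toList.length + 2) (x + xo) (y + yo)) = _
  rw [pv_walk_find scheme hrect xo yo hd _ (x + xo) (y + yo) (fun hin => by
    have := pv_mu_le (pvW scheme) (pvH scheme) xo yo (x + xo) (y + yo) hin
    simp only [pvW, pvH] at *
    omega)]
  unfold pvRay
  congr 1
  apply pv_ray_stable (pvW scheme) (pvH scheme) xo yo hd
  intro hin
  have := pv_mu_le (pvW scheme) (pvH scheme) xo yo (x + xo) (y + yo) hin
  constructor <;> (simp only [pvW, pvH] at *; omega)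

theorem pv_split8 (F : Int → Int → Option (Int × Int)) (h00 : F 0 0 = none) :
    ([-1, 0, 1] : List Int).flatMap (fun xo => ([-1, 0, 1] : List Int).filterMap (F xo)) =
    ([(-1, -1), (-1, 0), (-1, 1), (0, -1), (0, 1), (1, -1), (1, 0), (1, 1)] :
        List (Int × Int)).filterMap (fun d => F d.1 d.2) := by
  simp only [List.flatMap_cons, List.flatMap_nil, List.filterMap_cons, List.filterMap_nil,
    List.append_nil, h00]
  rcases F (-1) (-1) with _ | v1 <;> rcases F (-1) 0 with _ | v2 <;>
    rcases F (-1) 1 with _ | v3 <;> rcases F 0 (-1) with _ | v4 <;>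
    rcases F 0 1 with _ | v5 <;> rcases F 1 (-1) with _ | v6 <;>
    rcases F 1 0 with _ | v7 <;> rcases F 1 1 with _ | v8 <;> rfl

theorem pv_vis_eq (scheme : List String)
    (hrect : ∀ r ∈ scheme, r.toList.length = (scheme.headD "").toList.length)
    (x y : Int) (hy : 0 ≤ y ∧ y < pvH scheme) :
    getVisibleSeats scheme x y =
      ([(-1, -1), (-1, 0), (-1, 1), (0, -1), (0, 1), (1, -1), (1, 0), (1, 1)] :
          List (Int × Int)).filterMap
        (fun d => (pvRay (pvW scheme) (pvH scheme) d.1 d.2 (x + d.1) (y + d.2)).find?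
          (pvPB (pvGridB scheme))) := by
  unfold getVisibleSeats
  rw [pv_split8 _ (by norm_num)]
  apply List.filterMap_congr
  intro d hdm
  simp only [List.mem_cons, List.not_mem_nil, or_false] at hdm
  have hstep : ∀ (hd : pvDirOK d.1 d.2),
      (if d.1 = 0 ∧ d.2 = 0 then none
       else (let p := pvWalk scheme ((scheme.getD y.toNat "").toList.length : Int) d.1 d.2
              (scheme.length + (scheme.getD y.toNat "").toList.length + 2) (x + d.1) (y + d.2)
             if (0 ≤ p.1 ∧ p.1 < ((scheme.getD y.toNat "").toList.length : Int)) ∧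
                (0 ≤ p.2 ∧ p.2 < (scheme.length : Int)) ∧ pvCharAt scheme p.1 p.2 = 'L'
             then some p else none)) =
      (pvRay (pvW scheme) (pvH scheme) d.1 d.2 (x + d.1) (y + d.2)).find?
        (pvPB (pvGridB scheme)) := by
    intro hd
    rw [if_neg (fun hcon => hd.2.2 ⟨hcon.1, hcon.2⟩)]
    exact pv_wrap_dir scheme hrect x y hy d.1 d.2 hd
  rcases hdm with rfl | rfl | rfl | rfl | rfl | rfl | rfl | rfl <;>
    exact hstep (by unfold pvDirOK; norm_num)


-- ---- the per-direction family lemma ----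
theorem pv_lf_keys_nodup (grid : PySem.Dict (Int × Int) Char) (W H dx dy : Int)
    (hd : pvDirOK dx dy) : ((pvLF grid W H dx dy).map (·.1)).Nodup := by
  unfold pvLF
  rw [List.map_flatMap]
  apply pv_nodup_flatMap _ _ (pv_starts_nodup W H dx dy)
  · intro s _
    rw [pv_consec_map_fst]
    exact (List.dropLast_sublist _).nodup
      ((pv_ray_nodup W H dx dy hd _ s.1 s.2).filter _)
  · intro a ha b hb hab z hza hzb
    rw [pv_consec_map_fst] at hza hzb
    have h1 : z ∈ pvRay W H dx dy a.1 a.2 :=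
      List.mem_of_mem_filter ((List.dropLast_sublist _).subset hza)
    have h2 : z ∈ pvRay W H dx dy b.1 b.2 :=
      List.mem_of_mem_filter ((List.dropLast_sublist _).subset hzb)
    obtain ⟨_, hsa⟩ := (pv_mem_starts W H dx dy a).mp ha
    obtain ⟨_, hsb⟩ := (pv_mem_starts W H dx dy b).mp hb
    exact hab (pv_ray_uniq W H dx dy hd a b z hsa hsb h1 h2)

theorem pv_lb_keys_nodup (grid : PySem.Dict (Int × Int) Char) (W H dx dy : Int)
    (hd : pvDirOK dx dy) : ((pvLB grid W H dx dy).map (·.1)).Nodup := by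
  unfold pvLB
  rw [List.map_flatMap]
  have hkey : ∀ s : Int × Int,
      (((pvConsec (pvLine grid W H dx dy s)).map (fun e => (e.2, e.1))).map (·.1)) =
        (pvLine grid W H dx dy s).tail := by
    intro s
    rw [List.map_map]
    exact pv_consec_map_snd _
  apply pv_nodup_flatMap _ _ (pv_starts_nodup W H dx dy)
  · intro s _
    rw [hkey]
    exact (List.tail_sublist _).nodup ((pv_ray_nodup W H dx dy hd _ s.1 s.2).filter _)
  · intro a ha b hb hab z hza hzb
    rw [hkey] at hza hzb
    have h1 : z ∈ pvRay W H dx dy a.1 a.2 :=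
      List.mem_of_mem_filter ((List.tail_sublist _).subset hza)
    have h2 : z ∈ pvRay W H dx dy b.1 b.2 :=
      List.mem_of_mem_filter ((List.tail_sublist _).subset hzb)
    obtain ⟨_, hsa⟩ := (pv_mem_starts W H dx dy a).mp ha
    obtain ⟨_, hsb⟩ := (pv_mem_starts W H dx dy b).mp hb
    exact hab (pv_ray_uniq W H dx dy hd a b z hsa hsb h1 h2)

theorem pv_family_get (grid : PySem.Dict (Int × Int) Char) (W H dx dy : Int)
    (hd : pvDirOK dx dy) (p : Int × Int) (hin : pvInb W H p = true)
    (hP : pvPB grid p = true) :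
    (pvSweepB grid W H dx dy).1.get? p =
      (pvRay W H dx dy (p.1 + dx) (p.2 + dy)).find? (pvPB grid) ∧
    (pvSweepB grid W H dx dy).2.get? p =
      (pvRay W H (-dx) (-dy) (p.1 - dx) (p.2 - dy)).find? (pvPB grid) := by
  obtain ⟨s, hsin, hss, hmem⟩ := pv_ray_cover W H dx dy hd p hin
  obtain ⟨pre, suf, heq, hsuf⟩ := pv_ray_split W H dx dy hd s.1 s.2 p hmem
  have hback := pv_ray_back W H dx dy hd s.1 s.2 hss pre p suf heq
  have hsmem : s ∈ pvStartsB W H dx dy := (pv_mem_starts W H dx dy s).mpr ⟨hsin, hss⟩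
  have hline : pvLine grid W H dx dy s =
      (pre.filter (pvPB grid)) ++ p :: (suf.filter (pvPB grid)) := by
    unfold pvLine
    rw [heq, List.filter_append]
    simp [List.filter_cons, hP]
  have hnodupLine : (pvLine grid W H dx dy s).Nodup :=
    (pv_ray_nodup W H dx dy hd _ s.1 s.2).filter _
  constructor
  · rw [pv_sweep_eq, ← hsuf, ← List.head?_filter]
    cases hsufF : suf.filter (pvPB grid) with
    | cons q rest =>
      rw [pv_ins_get_mem _ p q (pv_lf_keys_nodup grid W H dx dy hd) ?_]
      · rfl
      · unfold pvLF
        apply List.mem_flatMap.mpr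
        refine ⟨s, hsmem, ?_⟩
        rw [hline, hsufF]
        exact pv_consec_mem_append p q rest _
    | nil =>
      rw [pv_ins_get_none _ p (pv_lf_keys_nodup grid W H dx dy hd) ?_]
      · rfl
      · intro hcon
        unfold pvLF at hcon
        rw [List.map_flatMap] at hcon
        obtain ⟨s', hs', hz⟩ := List.mem_flatMap.mp hcon
        rw [pv_consec_map_fst] at hz
        have hz' : p ∈ pvLine grid W H dx dy s' := (List.dropLast_sublist _).subset hz
        have hzr : p ∈ pvRay W H dx dy s'.1 s'.2 := List.mem_of_mem_filter hz'
        obtain ⟨_, hs'start⟩ := (pv_mem_starts W H dx dy s').mp hs'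
        obtain rfl : s' = s := pv_ray_uniq W H dx dy hd s' s p hs'start hss hzr hmem
        rw [hline, hsufF, List.dropLast_concat] at hz
        have hnd := hnodupLine
        rw [hline, hsufF] at hnd
        obtain ⟨_, _, hdisj⟩ := List.nodup_append.mp hnd
        exact hdisj p hz p (List.mem_singleton_self p) rfl
  · rw [pv_sweep_eq, ← hback, ← List.head?_filter, List.filter_reverse, List.head?_reverse]
    cases hlast : (pre.filter (pvPB grid)).getLast? with
    | some q =>
      obtain ⟨F1', hF1⟩ := List.getLast?_eq_some_iff.mp hlast
      rw [pv_ins_get_mem _ p q (pv_lb_keys_nodup grid W H dx dy hd) ?_]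
      unfold pvLB
      apply List.mem_flatMap.mpr
      refine ⟨s, hsmem, ?_⟩
      apply List.mem_map.mpr
      refine ⟨(q, p), ?_, rfl⟩
      rw [hline, hF1, List.append_assoc, List.singleton_append]
      exact pv_consec_mem_append q p _ _
    | none =>
      have hF1 : pre.filter (pvPB grid) = [] := List.getLast?_eq_none_iff.mp hlast
      rw [pv_ins_get_none _ p (pv_lb_keys_nodup grid W H dx dy hd) ?_]
      intro hcon
      unfold pvLB at hcon
      rw [List.map_flatMap] at hcon
      obtain ⟨s', hs', hz⟩ := List.mem_flatMap.mp hcon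
      have hkey : (((pvConsec (pvLine grid W H dx dy s')).map (fun e => (e.2, e.1))).map (·.1)) =
          (pvLine grid W H dx dy s').tail := by
        rw [List.map_map]; exact pv_consec_map_snd _
      rw [hkey] at hz
      have hz' : p ∈ pvLine grid W H dx dy s' := (List.tail_sublist _).subset hz
      have hzr : p ∈ pvRay W H dx dy s'.1 s'.2 := List.mem_of_mem_filter hz'
      obtain ⟨_, hs'start⟩ := (pv_mem_starts W H dx dy s').mp hs'
      obtain rfl : s' = s := pv_ray_uniq W H dx dy hd s' s p hs'start hss hzr hmem
      rw [hline, hF1, List.nil_append, List.tail_cons] at hz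
      have hnd := hnodupLine
      rw [hline, hF1, List.nil_append] at hnd
      exact (List.nodup_cons.mp hnd).1 hz


-- ---- top-level assembly ----
theorem pv_adj (scheme : List String) (x y : Int) :
    getAdjacentSeats scheme x y =
      ([-1, 0, 1] : List Int).flatMap (fun dx =>
        ([-1, 0, 1] : List Int).filterMap (fun dy =>
          if (¬ dx = 0 ∨ ¬ dy = 0) ∧
             (0 ≤ x + dx ∧ x + dx < ((scheme.headD "").toList.length : Int)) ∧
             (0 ≤ y + dy ∧ y + dy < (scheme.length : Int))
          then some (x + dx, y + dy) else none)) := by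
  unfold getAdjacentSeats
  have h : ∀ xo yo : Int,
      (if (0 ≤ x + xo ∧ x + xo < ((scheme.headD "").toList.length : Int)) ∧
          (0 ≤ y + yo ∧ y + yo < (scheme.length : Int)) ∧ (¬ xo = 0 ∨ ¬ yo = 0)
       then some (x + xo, y + yo) else none) =
      (if (¬ xo = 0 ∨ ¬ yo = 0) ∧
          (0 ≤ x + xo ∧ x + xo < ((scheme.headD "").toList.length : Int)) ∧
          (0 ≤ y + yo ∧ y + yo < (scheme.length : Int))
       then some (x + xo, y + yo) else none) := by
    intro xo yo
    exact if_congr (by tauto) rfl rfl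
  simp only [h]

theorem pv_part1 (scheme : List String) :
    generateSeatsDict scheme 1 = generateSeatsDict_alt scheme 1 := by
  unfold generateSeatsDict generateSeatsDict_alt
  rw [if_pos rfl]
  simp only [show ((1 : Int) = 1) ↔ True from by norm_num, if_true, pv_adj]

theorem pv_partO (scheme : List String) (part : Int) (h1 : ¬ part = 1) (h2 : ¬ part = 2) :
    generateSeatsDict scheme part = generateSeatsDict_alt scheme part := by
  unfold generateSeatsDict generateSeatsDict_alt
  rw [if_neg h1, if_neg h2]
  simp only [show (part = 1) ↔ False from by simp [h1], show (part = 2) ↔ False from by simp [h2],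
    if_false]
  apply List.flatMap_eq_nil_iff.mpr
  intro y _
  apply List.filterMap_eq_nil_iff.mpr
  intro x _
  split_ifs <;> rfl

theorem pv_char_noL (scheme : List String) (hno : ∀ r ∈ scheme, ¬ 'L' ∈ r.toList)
    (y x : Nat) (hy : y < scheme.length) (hx : x < (scheme.getD y "").toList.length) :
    ¬ pvCharAt scheme (x : Int) (y : Int) = 'L' := by
  intro hch
  unfold pvCharAt at hch
  simp only [Int.toNat_natCast] at hch
  rw [List.getD_eq_getElem _ ' ' hx] at hch
  exact hno _ (by rw [List.getD_eq_getElem scheme "" hy]; exact List.getElem_mem hy)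
    (hch ▸ List.getElem_mem hx)

theorem pv_noL2 (scheme : List String) (hno : ∀ r ∈ scheme, ¬ 'L' ∈ r.toList) :
    generateSeatsDict scheme 2 = generateSeatsDict_alt scheme 2 := by
  unfold generateSeatsDict generateSeatsDict_alt
  rw [if_neg (by norm_num), if_pos rfl]
  rw [List.flatMap_eq_nil_iff.mpr ?_]
  · have hseats : (List.range scheme.length).flatMap (fun (y : Nat) =>
        (List.range (scheme.getD y "").toList.length).filterMap (fun (x : Nat) =>
          if pvCharAt scheme (x : Int) (y : Int) = 'L' then some ((x : Int), (y : Int))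
          else none)) = [] := by
      apply List.flatMap_eq_nil_iff.mpr
      intro y hy
      apply List.filterMap_eq_nil_iff.mpr
      intro x hx
      rw [List.mem_range] at hy hx
      rw [if_neg (pv_char_noL scheme hno y x hy hx)]
    rw [hseats]
    rfl
  · intro y hy
    apply List.filterMap_eq_nil_iff.mpr
    intro x hx
    rw [List.mem_range] at hy hx
    rw [if_neg (pv_char_noL scheme hno y x hy hx)]

theorem pv_look_eq (scheme : List String)
    (hrect : ∀ r ∈ scheme, r.toList.length = (scheme.headD "").toList.length)
    (p : Int × Int) (hin : pvInb (pvW scheme) (pvH scheme) p = true)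
    (hP : pvPB (pvGridB scheme) p = true) :
    ([(-1, -1), (-1, 0), (-1, 1), (0, -1), (0, 1), (1, -1), (1, 0), (1, 1)] :
        List (Int × Int)).filterMap
      (fun d => (pvRay (pvW scheme) (pvH scheme) d.1 d.2 (p.1 + d.1) (p.2 + d.2)).find?
        (pvPB (pvGridB scheme))) =
    ([(pvSweepB (pvGridB scheme) (pvW scheme) (pvH scheme) 1 1).2,
      (pvSweepB (pvGridB scheme) (pvW scheme) (pvH scheme) 1 0).2,
      (pvSweepB (pvGridB scheme) (pvW scheme) (pvH scheme) 1 (-1)).2,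
      (pvSweepB (pvGridB scheme) (pvW scheme) (pvH scheme) 0 1).2,
      (pvSweepB (pvGridB scheme) (pvW scheme) (pvH scheme) 0 1).1,
      (pvSweepB (pvGridB scheme) (pvW scheme) (pvH scheme) 1 (-1)).1,
      (pvSweepB (pvGridB scheme) (pvW scheme) (pvH scheme) 1 0).1,
      (pvSweepB (pvGridB scheme) (pvW scheme) (pvH scheme) 1 1).1]).filterMap
      (fun d => d.get? p) := by
  have f11 := pv_family_get (pvGridB scheme) (pvW scheme) (pvH scheme) 1 1
    (by unfold pvDirOK; norm_num) p hin hP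
  have f10 := pv_family_get (pvGridB scheme) (pvW scheme) (pvH scheme) 1 0
    (by unfold pvDirOK; norm_num) p hin hP
  have f01 := pv_family_get (pvGridB scheme) (pvW scheme) (pvH scheme) 0 1
    (by unfold pvDirOK; norm_num) p hin hP
  have f1m := pv_family_get (pvGridB scheme) (pvW scheme) (pvH scheme) 1 (-1)
    (by unfold pvDirOK; norm_num) p hin hP
  have e1 : (pvSweepB (pvGridB scheme) (pvW scheme) (pvH scheme) 1 1).2.get? p =
      (pvRay (pvW scheme) (pvH scheme) (-1) (-1) (p.1 + -1) (p.2 + -1)).find?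
        (pvPB (pvGridB scheme)) := by
    rw [f11.2]; simp only [sub_eq_add_neg, neg_zero, neg_neg, add_zero]
  have e2 : (pvSweepB (pvGridB scheme) (pvW scheme) (pvH scheme) 1 0).2.get? p =
      (pvRay (pvW scheme) (pvH scheme) (-1) 0 (p.1 + -1) (p.2 + 0)).find?
        (pvPB (pvGridB scheme)) := by
    rw [f10.2]; simp only [sub_eq_add_neg, neg_zero, neg_neg, add_zero]
  have e3 : (pvSweepB (pvGridB scheme) (pvW scheme) (pvH scheme) 1 (-1)).2.get? p =
      (pvRay (pvW scheme) (pvH scheme) (-1) 1 (p.1 + -1) (p.2 + 1)).find?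
        (pvPB (pvGridB scheme)) := by
    rw [f1m.2]; simp only [sub_eq_add_neg, neg_zero, neg_neg, add_zero]
  have e4 : (pvSweepB (pvGridB scheme) (pvW scheme) (pvH scheme) 0 1).2.get? p =
      (pvRay (pvW scheme) (pvH scheme) 0 (-1) (p.1 + 0) (p.2 + -1)).find?
        (pvPB (pvGridB scheme)) := by
    rw [f01.2]; simp only [sub_eq_add_neg, neg_zero, neg_neg, add_zero]
  have e5 : (pvSweepB (pvGridB scheme) (pvW scheme) (pvH scheme) 0 1).1.get? p =
      (pvRay (pvW scheme) (pvH scheme) 0 1 (p.1 + 0) (p.2 + 1)).find?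
        (pvPB (pvGridB scheme)) := by
    rw [f01.1]
  have e6 : (pvSweepB (pvGridB scheme) (pvW scheme) (pvH scheme) 1 (-1)).1.get? p =
      (pvRay (pvW scheme) (pvH scheme) 1 (-1) (p.1 + 1) (p.2 + -1)).find?
        (pvPB (pvGridB scheme)) := by
    rw [f1m.1]
  have e7 : (pvSweepB (pvGridB scheme) (pvW scheme) (pvH scheme) 1 0).1.get? p =
      (pvRay (pvW scheme) (pvH scheme) 1 0 (p.1 + 1) (p.2 + 0)).find?
        (pvPB (pvGridB scheme)) := by
    rw [f10.1]
  have e8 : (pvSweepB (pvGridB scheme) (pvW scheme) (pvH scheme) 1 1).1.get? p =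
      (pvRay (pvW scheme) (pvH scheme) 1 1 (p.1 + 1) (p.2 + 1)).find?
        (pvPB (pvGridB scheme)) := by
    rw [f11.1]
  simp only [List.filterMap_cons, List.filterMap_nil, e1, e2, e3, e4, e5, e6, e7, e8,
    sub_eq_add_neg, neg_zero, neg_neg, add_zero]

theorem pv_part2_rect (scheme : List String)
    (hrect : ∀ r ∈ scheme, r.toList.length = (scheme.headD "").toList.length) :
    generateSeatsDict scheme 2 = generateSeatsDict_alt scheme 2 := by
  unfold generateSeatsDict generateSeatsDict_alt
  rw [if_neg (by norm_num), if_pos rfl]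
  simp only [show ((2 : Int) = 1) ↔ False from by norm_num,
    show ((2 : Int) = 2) ↔ True from by norm_num, if_false, if_true]
  rw [List.map_flatMap]
  simp only [List.map_filterMap]
  apply List.flatMap_congr
  intro y hy
  apply List.filterMap_congr
  intro x hx
  rw [List.mem_range] at hy hx
  by_cases hch : pvCharAt scheme (x : Int) (y : Int) = 'L'
  · rw [if_pos hch, if_pos hch]
    simp only [Option.map_some]
    have hyInt : 0 ≤ (y : Int) ∧ (y : Int) < pvH scheme := by
      unfold pvH; constructor <;> omega
    have hlen : (scheme.getD y "").toList.length = (scheme.headD "").toList.length :=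
      hrect _ (by rw [List.getD_eq_getElem scheme "" hy]; exact List.getElem_mem hy)
    have hin : pvInb (pvW scheme) (pvH scheme) ((x : Int), (y : Int)) = true := by
      simp only [pvInb, pvW, pvH, decide_eq_true_eq]
      refine ⟨by omega, by omega, by omega, by omega⟩
    have hPB : pvPB (pvGridB scheme) ((x : Int), (y : Int)) = true :=
      (pv_pb_iff scheme hrect _).mpr ⟨hin, hch⟩
    rw [pv_vis_eq scheme hrect (x : Int) (y : Int) hyInt]
    exact congrArg some
      (congrArg (fun t => ((x : Int), (y : Int), t)) (pv_look_eq scheme hrect _ hin hPB))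
  · rw [if_neg hch, if_neg hch]
    rfl

-- ===== VERDICT (by name: the statement is the Claim_ definition above) =====
theorem generateSeatsDict_spec : Claim_equal_generateSeatsDict := by
  intro scheme part _hdom hpre
  unfold Spec_generateSeatsDict
  by_cases h1 : part = 1
  · subst h1; exact pv_part1 scheme
  by_cases h2 : part = 2
  · subst h2
    rcases hpre rfl with hrect | hno
    · exact pv_part2_rect scheme hrect
    · exact pv_noL2 scheme hno
  · exact pv_partO scheme part h1 h2
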